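-- pv_equiv track=rewrite | github.com/FanchenBao/leetcode | LeetCode_2713.py | maxIncreasingCells
-- ===== SOURCE A (Python) =====
-- from typing import List
-- import math
--
-- def maxIncreasingCells(mat: List[List[int]]) -> int:
--     """Not tough in terms of implementation or intuition, but quite
--     difficult to figure out all the edge cases without trial-and-error.
--
--     The general idea is DP for each row and col, where rows[i] (or cols[j])
--     records the max cell count, the value at the max cell count, and the
--     max cell count at a cell value different from the max cell count value.
--     for rows (or cols).
--
--     We traverse the matrix from largest value to smallest, and for each val,
--     we check its rows[i] and cols[j]. If the val is different from the val
--     that results in the max count, the current max cell count is the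
--     previous max cell count + 1. Otherwise, the current max cell count is
--     the previous max cell count other than the max cell count val + 1.
--
--     After obtaining the current max cell count (go through rows and cols),
--     we need to update rows and cols. Update only happens if the current max
--     cell count is bigger than before, but pay attention that when the
--     current val is the same as the previous val that leads to max cell count
--     we do not update the max cell count at a cell value different from the
--     max cell count value.
--
--     O(MNlog(MN)), 1723 ms, faster than 97.73%
--     """
--     M, N = len(mat), len(mat[0])
--     rows = [[0, math.inf, 0] for _ in range(M)]  # each element is [max_cell_count, cell_val_at_max_cell_count, max_cell_count_from_diff_cell_val]
--     cols = [[0, math.inf, 0] for _ in range(N)]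
--     res = 0
--     for v, i, j in sorted(((mat[i][j], i, j) for i in range(M) for j in range(N)), reverse=True):
--         r = (rows[i][2] if rows[i][1] == v else rows[i][0]) + 1
--         c = (cols[j][2] if cols[j][1] == v else cols[j][0]) + 1
--         cur = max(r, c)
--         res = max(res, cur)
--         # Update rows and cols
--         if cur > rows[i][0]:
--             if rows[i][1] != v:
--                 rows[i][0], rows[i][2] = cur, rows[i][0]
--                 rows[i][1] = v
--             else:
--                 rows[i][0] = cur
--         if cur > cols[j][0]:
--             if cols[j][1] != v:
--                 cols[j][0], cols[j][2] = cur, cols[j][0]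
--                 cols[j][1] = v
--             else:
--                 cols[j][0] = cur
--     return res
-- ===== SOURCE B (Python) =====
-- def maxIncreasingCells(mat):
--     M, N = len(mat), len(mat[0])
--     # group the cells of each distinct value (row-major order within a group)
--     groups = {}
--     for i in range(M):
--         for j in range(N):
--             groups.setdefault(mat[i][j], []).append((i, j))
--     rows = [0] * M  # best increasing-path length starting at a cell of this row (among larger values)
--     cols = [0] * N
--     res = 0
--     for v in sorted(groups, reverse=True):
--         # read all row/col maxima for the value group before applying any update
--         cands = [(i, j, max(rows[i], cols[j]) + 1) for i, j in groups[v]]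
--         for i, j, cand in cands:
--             res = max(res, cand)
--             if cand > rows[i]:
--                 rows[i] = cand
--             if cand > cols[j]:
--                 cols[j] = cand
--     return res
-- ===== Notes on version B (the rewrite author's own statement) =====
-- stated objective: simpler
-- what changed: A sorts all cells descending and keeps per-row/col triples (best, value-at-best, best-at-other-value) to neutralise equal-value chains; B groups cells per distinct value in a dict, iterates the distinct values descending, and for each group computes all candidates from plain best-per-row/col arrays before writing any of them back.
import Mathlib
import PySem

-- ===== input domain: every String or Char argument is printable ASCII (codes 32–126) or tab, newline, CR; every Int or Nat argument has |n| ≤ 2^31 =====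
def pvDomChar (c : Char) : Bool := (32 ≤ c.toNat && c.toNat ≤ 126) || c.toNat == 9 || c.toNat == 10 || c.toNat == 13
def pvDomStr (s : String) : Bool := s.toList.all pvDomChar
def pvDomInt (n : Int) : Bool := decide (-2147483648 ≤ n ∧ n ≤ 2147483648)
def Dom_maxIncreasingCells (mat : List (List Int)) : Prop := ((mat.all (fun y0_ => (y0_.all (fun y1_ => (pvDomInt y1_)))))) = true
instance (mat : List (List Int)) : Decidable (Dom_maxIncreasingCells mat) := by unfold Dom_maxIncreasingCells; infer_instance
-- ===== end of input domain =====

-- B replaces A's per-row/col (best, value-at-best, best-at-other-value) triple bookkeeping over a fully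
-- sorted cell list by grouping cells per distinct value in a dict and doing a read-then-write two-pass
-- per value group over plain best-per-row/col arrays (objective: simpler).


-- ===== PORT A =====
-- the loop body of A; rows/cols entries are the triples [max_cell_count, cell_val_at_max_cell_count,
-- max_cell_count_from_diff_cell_val]; Python's math.inf sentinel in the middle slot is modelled as
-- `none` (exact: inf == v is False for every int v, and after the first update the slot holds an int)
def pvStepA (st : (List (Int × Option Int × Int)) × (List (Int × Option Int × Int)) × Int)
    (t : Int × Int × Int) : (List (Int × Option Int × Int)) × (List (Int × Option Int × Int)) × Int :=
  let rows := st.1; let cols := st.2.1; let res := st.2.2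
  let v := t.1; let i := t.2.1; let j := t.2.2
  let ri := PySem.List.pyGetD rows i (0, none, 0)
  let cj := PySem.List.pyGetD cols j (0, none, 0)
  let r := (if ri.2.1 = some v then ri.2.2 else ri.1) + 1
  let c := (if cj.2.1 = some v then cj.2.2 else cj.1) + 1
  let cur := max r c
  let res' := max res cur
  let rows' := if ri.1 < cur then
      (if ri.2.1 ≠ some v then PySem.List.pySetD rows i (cur, some v, ri.1)
       else PySem.List.pySetD rows i (cur, ri.2.1, ri.2.2))
    else rows
  let cols' := if cj.1 < cur then
      (if cj.2.1 ≠ some v then PySem.List.pySetD cols j (cur, some v, cj.1)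
       else PySem.List.pySetD cols j (cur, cj.2.1, cj.2.2))
    else cols
  (rows', cols', res')

def maxIncreasingCells (mat : List (List Int)) : Int :=
  let M : Int := PySem.List.len mat
  let N : Int := PySem.List.len (PySem.List.pyGetD mat 0 [])
  let cells : List (Int × Int × Int) :=
    (PySem.List.pyRange 0 M 1).flatMap (fun i =>
      (PySem.List.pyRange 0 N 1).map (fun j =>
        (PySem.List.pyGetD (PySem.List.pyGetD mat i []) j 0, i, j)))
  -- Python sorts the (v, i, j) triples lexicographically (reverse=True); the (i, j) tiebreak is
  -- encoded as the single key i*N+j, which orders (i, j) lexicographically because 0 ≤ j < N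
  -- for every generated cell
  let scells := PySem.List.sorted2 cells (fun t => t.1) (fun t => t.2.1 * N + t.2.2) true
  let rows0 := (PySem.List.pyRange 0 M 1).map (fun _ => ((0:Int), (none : Option Int), (0:Int)))
  let cols0 := (PySem.List.pyRange 0 N 1).map (fun _ => ((0:Int), (none : Option Int), (0:Int)))
  (scells.foldl pvStepA (rows0, cols0, 0)).2.2

-- ===== PORT B =====
-- the inner loop body of B: c = (i, j, cand); res = max(res, cand), then rows[i]/cols[j] rise to cand
def pvStepB (st : List Int × List Int × Int) (c : Int × Int × Int) : List Int × List Int × Int :=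
  let rows := st.1; let cols := st.2.1; let res := st.2.2
  let res' := max res c.2.2
  let rows' := if PySem.List.pyGetD rows c.1 0 < c.2.2 then PySem.List.pySetD rows c.1 c.2.2 else rows
  let cols' := if PySem.List.pyGetD cols c.2.1 0 < c.2.2 then PySem.List.pySetD cols c.2.1 c.2.2 else cols
  (rows', cols', res')

def maxIncreasingCells_alt (mat : List (List Int)) : Int :=
  let M : Int := PySem.List.len mat
  let N : Int := PySem.List.len (PySem.List.pyGetD mat 0 [])
  -- groups.setdefault(mat[i][j], []).append((i, j))
  let groups : PySem.Dict Int (List (Int × Int)) :=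
    (PySem.List.pyRange 0 M 1).foldl (fun d i =>
      (PySem.List.pyRange 0 N 1).foldl (fun d j =>
        d.modify (PySem.List.pyGetD (PySem.List.pyGetD mat i []) j 0) [] (· ++ [(i, j)])) d)
      PySem.Dict.empty
  let vals := PySem.List.sorted (PySem.Dict.keys groups) (fun x => x) true
  let rows0 : List Int := List.replicate M.toNat 0
  let cols0 : List Int := List.replicate N.toNat 0
  (vals.foldl (fun st v =>
      let g := groups.getD v []
      let cands := g.map (fun p =>
        (p.1, p.2, max (PySem.List.pyGetD st.1 p.1 0) (PySem.List.pyGetD st.2.1 p.2 0) + 1))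
      cands.foldl pvStepB st) (rows0, cols0, 0)).2.2

-- ===== PRECONDITION & SPEC =====
-- Pre_ excludes exactly the inputs where the Python A raises IndexError: the empty matrix (mat[0])
-- and matrices whose first row is longer than some later row (mat[i][j] for j < len(mat[0])).
def Pre_maxIncreasingCells (mat : List (List Int)) : Prop :=
  mat ≠ [] ∧ ∀ row ∈ mat, (mat.headI).length ≤ row.length
instance (mat : List (List Int)) : Decidable (Pre_maxIncreasingCells mat) := by
  unfold Pre_maxIncreasingCells; infer_instance
def pvWitness_maxIncreasingCells : List (List Int) := [[3, 1], [2, 4]]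

def Spec_maxIncreasingCells (mat : List (List Int)) (out : Int) : Prop := out = maxIncreasingCells_alt mat
instance (mat : List (List Int)) (out : Int) : Decidable (Spec_maxIncreasingCells mat out) := by
  unfold Spec_maxIncreasingCells; infer_instance

-- ===== CLAIM (what is proved, stated in full; the proofs are below) =====
def Claim_equal_maxIncreasingCells : Prop := ∀ (mat : List (List Int)), Dom_maxIncreasingCells mat → Pre_maxIncreasingCells mat → Spec_maxIncreasingCells mat (maxIncreasingCells mat)

-- ===== LEMMAS AND PROOFS =====

-- default triple for A's row/col reads
def pvD : Int × Option Int × Int := (0, none, 0)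
-- the encoded (i, j) tiebreak key
def pvK2 (N : Int) (t : Int × Int × Int) : Int := t.2.1 * N + t.2.2
-- the comparator sorted2 … true inserts with (reverse of its lexicographic `lt`)
def pvBef (N : Int) (a b : Int × Int × Int) : Bool :=
  decide (b.1 < a.1) || (!decide (a.1 < b.1) && decide (pvK2 N b < pvK2 N a))
-- strict lexicographic "greater" on (value, encoded tiebreak)
def pvLexGT (N : Int) (a b : Int × Int × Int) : Prop :=
  b.1 < a.1 ∨ (b.1 = a.1 ∧ pvK2 N b < pvK2 N a)

lemma pvBef_eq_true_iff (N : Int) (a b : Int × Int × Int) :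
    pvBef N a b = true ↔ (b.1 < a.1 ∨ (¬ a.1 < b.1 ∧ pvK2 N b < pvK2 N a)) := by
  unfold pvBef
  simp [Bool.or_eq_true, Bool.and_eq_true]

lemma pvBef_asymm (N : Int) (a b : Int × Int × Int) (h : pvBef N a b = true) : pvBef N b a = false := by
  rw [pvBef_eq_true_iff] at h
  rw [← Bool.not_eq_true, pvBef_eq_true_iff]
  omega

lemma pvBef_trans (N : Int) (a b c : Int × Int × Int) (h1 : pvBef N a b = true)
    (h2 : pvBef N b c = true) : pvBef N a c = true := by
  rw [pvBef_eq_true_iff] at h1 h2 ⊢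
  omega

lemma pvInsertBy_pairwise {α : Type} (bf : α → α → Bool)
    (hasym : ∀ a b, bf a b = true → bf b a = false)
    (htr : ∀ a b c, bf a b = true → bf b c = true → bf a c = true)
    (x : α) (ys : List α) (h : ys.Pairwise (fun a b => bf b a = false)) :
    (PySem.List.insertBy bf x ys).Pairwise (fun a b => bf b a = false) := by
  induction ys with
  | nil => simp [PySem.List.insertBy]
  | cons y ys ih =>
    rw [List.pairwise_cons] at h
    by_cases hxy : bf x y = true
    · rw [PySem.List.insertBy, if_pos hxy]
      refine List.Pairwise.cons ?_ (List.Pairwise.cons h.1 h.2)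
      intro z hz
      rcases List.mem_cons.1 hz with rfl | hz'
      · exact hasym _ _ hxy
      · by_contra hzx
        rw [Bool.not_eq_false] at hzx
        have := htr _ _ _ hzx hxy
        rw [h.1 z hz'] at this; exact Bool.false_ne_true this
    · rw [PySem.List.insertBy, if_neg hxy]
      refine List.Pairwise.cons ?_ (ih h.2)
      intro z hz
      rcases (PySem.List.mem_insertBy bf x z ys).1 hz with rfl | hz'
      · exact Bool.not_eq_true _ ▸ (by simpa using hxy)
      · exact h.1 z hz'

lemma pvFoldl_insertBy_pairwise {α : Type} (bf : α → α → Bool)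
    (hasym : ∀ a b, bf a b = true → bf b a = false)
    (htr : ∀ a b c, bf a b = true → bf b c = true → bf a c = true)
    (xs : List α) :
    (xs.foldl (fun acc x => PySem.List.insertBy bf x acc) []).Pairwise (fun a b => bf b a = false) := by
  suffices h : ∀ acc, acc.Pairwise (fun a b => bf b a = false) →
      (xs.foldl (fun acc x => PySem.List.insertBy bf x acc) acc).Pairwise (fun a b => bf b a = false) by
    exact h [] (List.Pairwise.nil)
  induction xs with
  | nil => intro acc h; simpa using h
  | cons x xs ih =>
    intro acc h
    exact ih _ (pvInsertBy_pairwise bf hasym htr x acc h)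

-- naming the reverse=True sorted2 output: any pvLexGT-descending rearrangement of a
-- tiebreak-distinct list is THE sorted2 result
lemma pvSorted2_rev_eq (N : Int) (xs ys : List (Int × Int × Int))
    (hx : xs.Pairwise (fun a b => pvK2 N a ≠ pvK2 N b))
    (hperm : ys.Perm xs)
    (hys : ys.Pairwise (pvLexGT N)) :
    PySem.List.sorted2 xs (fun t => t.1) (fun t => t.2.1 * N + t.2.2) true = ys := by
  have hfold : PySem.List.sorted2 xs (fun t => t.1) (fun t => t.2.1 * N + t.2.2) true =
      xs.foldl (fun acc x => PySem.List.insertBy (pvBef N) x acc) [] := rfl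
  have hout_perm : (PySem.List.sorted2 xs (fun t => t.1) (fun t => t.2.1 * N + t.2.2) true).Perm xs :=
    PySem.List.sorted2_perm xs _ _ true
  have hpwneg : (PySem.List.sorted2 xs (fun t => t.1) (fun t => t.2.1 * N + t.2.2) true).Pairwise
      (fun a b => pvBef N b a = false) := by
    rw [hfold]
    exact pvFoldl_insertBy_pairwise (pvBef N) (pvBef_asymm N) (pvBef_trans N) xs
  have hpwne : (PySem.List.sorted2 xs (fun t => t.1) (fun t => t.2.1 * N + t.2.2) true).Pairwise
      (fun a b => pvK2 N a ≠ pvK2 N b) := (List.Perm.pairwise_iff (fun {a b} h => Ne.symm h) hout_perm).2 hx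
  have hpwgt : (PySem.List.sorted2 xs (fun t => t.1) (fun t => t.2.1 * N + t.2.2) true).Pairwise
      (pvLexGT N) := by
    refine (hpwneg.and hpwne).imp ?_
    rintro a b ⟨h1, h2⟩
    rw [← Bool.not_eq_true, pvBef_eq_true_iff] at h1
    unfold pvLexGT
    omega
  refine List.Perm.eq_of_pairwise ?_ hpwgt hys (hout_perm.trans hperm.symm)
  intro a b _ _ h1 h2
  unfold pvLexGT at h1 h2
  exact absurd rfl (by omega : ¬ (0:Int) = 0)

-- ===== per-group simulation =====

-- start-of-group relation: A's triples carry B's counters, and no triple is tagged with the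
-- incoming value v
def pvStart (v : Int) (ra : List (Int × Option Int × Int)) (rb : List Int) : Prop :=
  ra.length = rb.length ∧ ∀ k : Nat, (ra.getD k pvD).1 = rb.getD k 0 ∧ (ra.getD k pvD).2.1 ≠ some v

-- mid-group relation relative to the group-start states ra0 (A) and br (B)
def pvMid (v : Int) (ra0 : List (Int × Option Int × Int)) (br : List Int)
    (ra : List (Int × Option Int × Int)) (rb : List Int) : Prop :=
  ra.length = br.length ∧ rb.length = br.length ∧
  ∀ k : Nat, (ra.getD k pvD).1 = rb.getD k 0 ∧
    ((ra.getD k pvD = ra0.getD k pvD ∧ rb.getD k 0 = br.getD k 0) ∨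
     ((ra.getD k pvD).2.1 = some v ∧ (ra.getD k pvD).2.2 = br.getD k 0))

lemma pvGetD_nonneg {α : Type} (xs : List α) (i : Int) (d : α) (h : 0 ≤ i) :
    PySem.List.pyGetD xs i d = xs.getD i.toNat d := by
  unfold PySem.List.pyGetD
  rw [PySem.List.pyGet?_of_nonneg xs h, List.getD_eq_getElem?_getD]

lemma pvGetD_set {α : Type} (xs : List α) (n k : Nat) (v : α) (d : α) :
    (xs.set n v).getD k d = if k = n ∧ n < xs.length then v else xs.getD k d := by
  by_cases hk : k = n
  · subst hk
    by_cases hl : k < xs.length <;> simp [List.getD_eq_getElem?_getD, hl]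
  · simp [List.getD_eq_getElem?_getD, Ne.symm hk, hk]

lemma pvMid_read (v : Int) (ra0 : List (Int × Option Int × Int)) (br : List Int)
    (ra : List (Int × Option Int × Int)) (rb : List Int)
    (hm : pvMid v ra0 br ra rb) (h0 : pvStart v ra0 br) (k0 : Nat) :
    (if (ra.getD k0 pvD).2.1 = some v then (ra.getD k0 pvD).2.2 else (ra.getD k0 pvD).1) =
      br.getD k0 0 := by
  obtain ⟨_, _, hp⟩ := hm
  obtain ⟨_, h0p⟩ := h0
  rcases (hp k0).2 with ⟨heq, hrb⟩ | ⟨hv, hb⟩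
  · rw [heq, if_neg (h0p k0).2, (h0p k0).1]
  · rw [if_pos hv, hb]

lemma pvMid_update (v : Int) (ra0 : List (Int × Option Int × Int)) (br : List Int)
    (ra : List (Int × Option Int × Int)) (rb : List Int)
    (hm : pvMid v ra0 br ra rb) (h0 : pvStart v ra0 br) (k0 : Nat) (cur : Int) :
    pvMid v ra0 br
      (if rb.getD k0 0 < cur then
        (if ¬ (ra.getD k0 pvD).2.1 = some v then ra.set k0 (cur, some v, rb.getD k0 0)
         else ra.set k0 (cur, (ra.getD k0 pvD).2.1, (ra.getD k0 pvD).2.2))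
       else ra)
      (if rb.getD k0 0 < cur then rb.set k0 cur else rb) := by
  obtain ⟨hl1, hl2, hp⟩ := hm
  obtain ⟨h0l, h0p⟩ := h0
  by_cases hlt : rb.getD k0 0 < cur
  · rw [if_pos hlt, if_pos hlt]
    by_cases hv : (ra.getD k0 pvD).2.1 = some v
    · rw [if_neg (not_not_intro hv)]
      refine ⟨by simpa using hl1, by simpa using hl2, ?_⟩
      intro k
      rw [pvGetD_set, pvGetD_set, hl1, hl2]
      by_cases hk : k = k0 ∧ k0 < br.length
      · rw [if_pos hk, if_pos hk]
        obtain ⟨rfl, _⟩ := hk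
        rcases (hp k).2 with ⟨heq, _⟩ | ⟨_, hb⟩
        · exact absurd (heq ▸ hv) (h0p k).2
        · exact ⟨rfl, Or.inr ⟨hv, hb⟩⟩
      · rw [if_neg hk, if_neg hk]
        exact hp k
    · rw [if_pos hv]
      have hunch : ra.getD k0 pvD = ra0.getD k0 pvD ∧ rb.getD k0 0 = br.getD k0 0 := by
        rcases (hp k0).2 with h | ⟨hsome, _⟩
        · exact h
        · exact absurd hsome hv
      refine ⟨by simpa using hl1, by simpa using hl2, ?_⟩
      intro k
      rw [pvGetD_set, pvGetD_set, hl1, hl2]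
      by_cases hk : k = k0 ∧ k0 < br.length
      · rw [if_pos hk, if_pos hk]
        obtain ⟨rfl, _⟩ := hk
        exact ⟨rfl, Or.inr ⟨rfl, hunch.2⟩⟩
      · rw [if_neg hk, if_neg hk]
        exact hp k
  · rw [if_neg hlt, if_neg hlt]
    exact ⟨hl1, hl2, hp⟩

lemma pvStep_sim (v : Int) (ra0 ca0 : List (Int × Option Int × Int)) (br bc : List Int)
    (h0r : pvStart v ra0 br) (h0c : pvStart v ca0 bc)
    (t : Int × Int × Int) (ht : t.1 = v) (hi : 0 ≤ t.2.1) (hj : 0 ≤ t.2.2)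
    (ra ca : List (Int × Option Int × Int)) (rb cb : List Int) (res : Int)
    (hmr : pvMid v ra0 br ra rb) (hmc : pvMid v ca0 bc ca cb) :
    pvMid v ra0 br (pvStepA (ra, ca, res) t).1
      (pvStepB (rb, cb, res) (t.2.1, t.2.2,
        max (PySem.List.pyGetD br t.2.1 0) (PySem.List.pyGetD bc t.2.2 0) + 1)).1 ∧
    pvMid v ca0 bc (pvStepA (ra, ca, res) t).2.1
      (pvStepB (rb, cb, res) (t.2.1, t.2.2,
        max (PySem.List.pyGetD br t.2.1 0) (PySem.List.pyGetD bc t.2.2 0) + 1)).2.1 ∧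
    (pvStepA (ra, ca, res) t).2.2 =
      (pvStepB (rb, cb, res) (t.2.1, t.2.2,
        max (PySem.List.pyGetD br t.2.1 0) (PySem.List.pyGetD bc t.2.2 0) + 1)).2.2 := by
  subst ht
  simp only [pvStepA, pvStepB]
  rw [pvGetD_nonneg ra _ _ hi, pvGetD_nonneg ca _ _ hj,
      pvGetD_nonneg rb _ 0 hi, pvGetD_nonneg cb _ 0 hj,
      pvGetD_nonneg br _ 0 hi, pvGetD_nonneg bc _ 0 hj]
  simp only [PySem.List.pySetD_of_nonneg _ _ hi, PySem.List.pySetD_of_nonneg _ _ hj]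
  have hreadr := pvMid_read _ ra0 br ra rb hmr h0r t.2.1.toNat
  have hreadc := pvMid_read _ ca0 bc ca cb hmc h0c t.2.2.toNat
  have h1r : (ra.getD t.2.1.toNat pvD).1 = rb.getD t.2.1.toNat 0 := (hmr.2.2 _).1
  have h1c : (ca.getD t.2.2.toNat pvD).1 = cb.getD t.2.2.toNat 0 := (hmc.2.2 _).1
  simp only [pvD] at hreadr hreadc h1r h1c
  rw [hreadr, hreadc, h1r, h1c]
  have hmx : max (br.getD t.2.1.toNat 0 + 1) (bc.getD t.2.2.toNat 0 + 1) =
      max (br.getD t.2.1.toNat 0) (bc.getD t.2.2.toNat 0) + 1 := by omega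
  rw [hmx]
  exact ⟨pvMid_update _ ra0 br ra rb hmr h0r _ _, pvMid_update _ ca0 bc ca cb hmc h0c _ _, rfl⟩

lemma pvG1 (v : Int) (ra0 ca0 : List (Int × Option Int × Int)) (br bc : List Int)
    (h0r : pvStart v ra0 br) (h0c : pvStart v ca0 bc) :
    ∀ (gl : List (Int × Int × Int)), (∀ t ∈ gl, t.1 = v ∧ 0 ≤ t.2.1 ∧ 0 ≤ t.2.2) →
    ∀ ra ca rb cb res, pvMid v ra0 br ra rb → pvMid v ca0 bc ca cb →
    pvMid v ra0 br (gl.foldl pvStepA (ra, ca, res)).1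
      ((gl.map (fun t => (t.2.1, t.2.2,
          max (PySem.List.pyGetD br t.2.1 0) (PySem.List.pyGetD bc t.2.2 0) + 1))).foldl pvStepB (rb, cb, res)).1 ∧
    pvMid v ca0 bc (gl.foldl pvStepA (ra, ca, res)).2.1
      ((gl.map (fun t => (t.2.1, t.2.2,
          max (PySem.List.pyGetD br t.2.1 0) (PySem.List.pyGetD bc t.2.2 0) + 1))).foldl pvStepB (rb, cb, res)).2.1 ∧
    (gl.foldl pvStepA (ra, ca, res)).2.2 =
      ((gl.map (fun t => (t.2.1, t.2.2,
          max (PySem.List.pyGetD br t.2.1 0) (PySem.List.pyGetD bc t.2.2 0) + 1))).foldl pvStepB (rb, cb, res)).2.2 := by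
  intro gl
  induction gl with
  | nil =>
    intro _ ra ca rb cb res hmr hmc
    exact ⟨hmr, hmc, rfl⟩
  | cons t gl ih =>
    intro hgl ra ca rb cb res hmr hmc
    obtain ⟨ht, hi, hj⟩ := hgl t (List.mem_cons_self ..)
    have hstep := pvStep_sim v ra0 ca0 br bc h0r h0c t ht hi hj ra ca rb cb res hmr hmc
    rw [List.foldl_cons, List.map_cons, List.foldl_cons]
    rcases hA : pvStepA (ra, ca, res) t with ⟨ra1, ca1, res1⟩
    rcases hB : pvStepB (rb, cb, res) (t.2.1, t.2.2,
        max (PySem.List.pyGetD br t.2.1 0) (PySem.List.pyGetD bc t.2.2 0) + 1) with ⟨rb1, cb1, res1'⟩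
    rw [hA, hB] at hstep
    have hres : res1 = res1' := hstep.2.2
    subst hres
    exact ih (fun x hx => hgl x (List.mem_cons_of_mem t hx)) ra1 ca1 rb1 cb1 res1 hstep.1 hstep.2.1

-- ===== B's inner loop characterised elementwise (order-independence) =====

lemma pvStepB_rows (rb cb : List Int) (res : Int) (c : Int × Int × Int) (hc : 0 ≤ c.1) :
    (pvStepB (rb, cb, res) c).1.length = rb.length ∧
    (∀ k : Nat, k < rb.length → (pvStepB (rb, cb, res) c).1.getD k 0 =
      if c.1 = (k : Int) then max (rb.getD k 0) c.2.2 else rb.getD k 0) := by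
  unfold pvStepB
  simp only [PySem.List.pySetD_of_nonneg _ _ hc, pvGetD_nonneg _ _ _ hc]
  constructor
  · split_ifs <;> simp
  · intro k hk
    by_cases heq : c.1 = (k : Int)
    · have htn : c.1.toNat = k := by omega
      rw [if_pos heq]
      split_ifs with hlt
      · rw [htn] at hlt
        rw [htn, pvGetD_set, if_pos (⟨rfl, hk⟩ : k = k ∧ k < rb.length)]
        omega
      · rw [htn] at hlt; omega
    · have htn : c.1.toNat ≠ k := by omega
      rw [if_neg heq]
      split_ifs with hlt
      · rw [pvGetD_set]
        simp [Ne.symm htn]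
      · rfl

lemma pvStepB_cols (rb cb : List Int) (res : Int) (c : Int × Int × Int) (hc : 0 ≤ c.2.1) :
    (pvStepB (rb, cb, res) c).2.1.length = cb.length ∧
    (∀ k : Nat, k < cb.length → (pvStepB (rb, cb, res) c).2.1.getD k 0 =
      if c.2.1 = (k : Int) then max (cb.getD k 0) c.2.2 else cb.getD k 0) := by
  unfold pvStepB
  simp only [PySem.List.pySetD_of_nonneg _ _ hc, pvGetD_nonneg _ _ _ hc]
  constructor
  · split_ifs <;> simp
  · intro k hk
    by_cases heq : c.2.1 = (k : Int)
    · have htn : c.2.1.toNat = k := by omega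
      rw [if_pos heq]
      split_ifs with hlt
      · rw [htn] at hlt
        rw [htn, pvGetD_set, if_pos (⟨rfl, hk⟩ : k = k ∧ k < cb.length)]
        omega
      · rw [htn] at hlt; omega
    · have htn : c.2.1.toNat ≠ k := by omega
      rw [if_neg heq]
      split_ifs with hlt
      · rw [pvGetD_set]
        simp [Ne.symm htn]
      · rfl

lemma pvB_char (cl : List (Int × Int × Int)) (hcl : ∀ c ∈ cl, 0 ≤ c.1 ∧ 0 ≤ c.2.1) :
    ∀ rb cb res,
    (cl.foldl pvStepB (rb, cb, res)).1.length = rb.length ∧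
    (cl.foldl pvStepB (rb, cb, res)).2.1.length = cb.length ∧
    (∀ k : Nat, k < rb.length → (cl.foldl pvStepB (rb, cb, res)).1.getD k 0 =
      ((cl.filter (fun c => c.1 == (k : Int))).map (fun c => c.2.2)).foldl max (rb.getD k 0)) ∧
    (∀ k : Nat, k < cb.length → (cl.foldl pvStepB (rb, cb, res)).2.1.getD k 0 =
      ((cl.filter (fun c => c.2.1 == (k : Int))).map (fun c => c.2.2)).foldl max (cb.getD k 0)) ∧
    (cl.foldl pvStepB (rb, cb, res)).2.2 = (cl.map (fun c => c.2.2)).foldl max res := by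
  induction cl with
  | nil => intro rb cb res; simp
  | cons c cl ih =>
    intro rb cb res
    have hc := hcl c (List.mem_cons_self ..)
    have hcl' : ∀ x ∈ cl, 0 ≤ x.1 ∧ 0 ≤ x.2.1 := fun x hx => hcl x (List.mem_cons_of_mem c hx)
    have hrows := pvStepB_rows rb cb res c hc.1
    have hcols := pvStepB_cols rb cb res c hc.2
    have hres : (pvStepB (rb, cb, res) c).2.2 = max res c.2.2 := rfl
    rcases hx : pvStepB (rb, cb, res) c with ⟨rb', cb', res'⟩
    rw [List.foldl_cons, hx]
    obtain ⟨ih1, ih2, ih3, ih4, ih5⟩ := ih hcl' rb' cb' res'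
    rw [hx] at hrows hcols hres
    have hlr : rb'.length = rb.length := hrows.1
    have hlc : cb'.length = cb.length := hcols.1
    have hgr : ∀ k : Nat, k < rb.length →
        rb'.getD k 0 = if c.1 = (k : Int) then max (rb.getD k 0) c.2.2 else rb.getD k 0 := hrows.2
    have hgc : ∀ k : Nat, k < cb.length →
        cb'.getD k 0 = if c.2.1 = (k : Int) then max (cb.getD k 0) c.2.2 else cb.getD k 0 := hcols.2
    have hres2 : res' = max res c.2.2 := hres
    refine ⟨by rw [ih1, hlr], by rw [ih2, hlc], ?_, ?_, ?_⟩
    · intro k hk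
      rw [ih3 k (by rw [hlr]; exact hk)]
      by_cases hck : c.1 = (k : Int)
      · simp only [List.filter_cons, hck, beq_self_eq_true, if_pos, List.map_cons, List.foldl_cons]
        rw [hgr k hk, if_pos hck]
      · have hb : (c.1 == (k : Int)) = false := by simp [hck]
        simp only [List.filter_cons, hb, Bool.false_eq_true, if_false]
        rw [hgr k hk, if_neg hck]
    · intro k hk
      rw [ih4 k (by rw [hlc]; exact hk)]
      by_cases hck : c.2.1 = (k : Int)
      · simp only [List.filter_cons, hck, beq_self_eq_true, if_pos, List.map_cons, List.foldl_cons]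
        rw [hgc k hk, if_pos hck]
      · have hb : (c.2.1 == (k : Int)) = false := by simp [hck]
        simp only [List.filter_cons, hb, Bool.false_eq_true, if_false]
        rw [hgc k hk, if_neg hck]
    · rw [ih5, hres2, List.map_cons, List.foldl_cons]

lemma pvB_perm (cl cl' : List (Int × Int × Int)) (hp : cl.Perm cl')
    (hcl : ∀ c ∈ cl, 0 ≤ c.1 ∧ 0 ≤ c.2.1) (st : List Int × List Int × Int) :
    cl.foldl pvStepB st = cl'.foldl pvStepB st := by
  obtain ⟨rb, cb, res⟩ := st
  have hcl' : ∀ c ∈ cl', 0 ≤ c.1 ∧ 0 ≤ c.2.1 := fun c hc => hcl c (hp.symm.subset hc)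
  obtain ⟨l1, l2, g1, g2, r1⟩ := pvB_char cl hcl rb cb res
  obtain ⟨l1', l2', g1', g2', r1'⟩ := pvB_char cl' hcl' rb cb res
  have hfold : ∀ (l l' : List Int) (b : Int), l.Perm l' → l.foldl max b = l'.foldl max b :=
    fun l l' b h => @List.Perm.foldl_eq _ _ max l l' ⟨fun b a₁ a₂ => max_right_comm b a₁ a₂⟩ h b
  have hrows : (cl.foldl pvStepB (rb, cb, res)).1 = (cl'.foldl pvStepB (rb, cb, res)).1 := by
    apply List.ext_getElem (by rw [l1, l1'])
    intro k h1 h2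
    have hk : k < rb.length := by rw [l1] at h1; exact h1
    rw [← List.getD_eq_getElem _ 0 h1, ← List.getD_eq_getElem _ 0 h2, g1 k hk, g1' k hk]
    exact hfold _ _ _ ((hp.filter _).map _)
  have hcols : (cl.foldl pvStepB (rb, cb, res)).2.1 = (cl'.foldl pvStepB (rb, cb, res)).2.1 := by
    apply List.ext_getElem (by rw [l2, l2'])
    intro k h1 h2
    have hk : k < cb.length := by rw [l2] at h1; exact h1
    rw [← List.getD_eq_getElem _ 0 h1, ← List.getD_eq_getElem _ 0 h2, g2 k hk, g2' k hk]
    exact hfold _ _ _ ((hp.filter _).map _)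
  have hres : (cl.foldl pvStepB (rb, cb, res)).2.2 = (cl'.foldl pvStepB (rb, cb, res)).2.2 := by
    rw [r1, r1']
    exact hfold _ _ _ (hp.map _)
  exact Prod.ext hrows (Prod.ext hcols hres)

-- ===== the generated cell list and value groups =====

lemma pvCells_pw (g : Int → Int → Int) (M N : Int) :
    ((PySem.List.pyRange 0 M 1).flatMap (fun i =>
      (PySem.List.pyRange 0 N 1).map (fun j => (g i j, i, j)))).Pairwise
      (fun a b => pvK2 N a < pvK2 N b) := by
  rw [List.pairwise_flatMap]
  constructor
  · intro i _
    rw [List.pairwise_map]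
    refine (PySem.List.pairwise_lt_pyRange_one 0 N).imp ?_
    intro j j' hj
    unfold pvK2
    show i * N + j < i * N + j'
    omega
  · refine (PySem.List.pairwise_lt_pyRange_one 0 M).imp_of_mem ?_
    intro i1 i2 h1 h2 hlt x hx y hy
    obtain ⟨j1, hj1, rfl⟩ := List.mem_map.1 hx
    obtain ⟨j2, hj2, rfl⟩ := List.mem_map.1 hy
    rw [PySem.List.mem_pyRange_one] at hj1 hj2
    unfold pvK2
    show i1 * N + j1 < i2 * N + j2
    have hmul : (i1 + 1) * N ≤ i2 * N :=
      mul_le_mul_of_nonneg_right (by omega) (by omega)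
    rw [add_one_mul] at hmul
    omega

lemma pvCells_mem (g : Int → Int → Int) (M N : Int) :
    ∀ t ∈ ((PySem.List.pyRange 0 M 1).flatMap (fun i =>
      (PySem.List.pyRange 0 N 1).map (fun j => (g i j, i, j)))), 0 ≤ t.2.1 ∧ 0 ≤ t.2.2 := by
  intro t ht
  obtain ⟨i, hi, ht2⟩ := List.mem_flatMap.1 ht
  obtain ⟨j, hj, rfl⟩ := List.mem_map.1 ht2
  rw [PySem.List.mem_pyRange_one] at hi hj
  exact ⟨show (0:Int) ≤ i by omega, show (0:Int) ≤ j by omega⟩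

lemma pvPerm_flatMap_filter {α : Type} (key : α → Int) :
    ∀ (vs : List Int), vs.Nodup → ∀ (l : List α), (∀ x ∈ l, key x ∈ vs) →
    (vs.flatMap (fun v => l.filter (fun x => key x == v))).Perm l := by
  intro vs
  induction vs with
  | nil =>
    intro _ l hl
    have : l = [] := by
      cases l with
      | nil => rfl
      | cons x xs => exact absurd (hl x (List.mem_cons_self ..)) (List.not_mem_nil)
    simp [this]
  | cons v vs ih =>
    intro hnd l hl
    rw [List.flatMap_cons]
    have hvnotin : v ∉ vs := (List.nodup_cons.1 hnd).1
    have hrest : vs.flatMap (fun v' => l.filter (fun x => key x == v')) =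
        vs.flatMap (fun v' => (l.filter (fun x => !(key x == v))).filter (fun x => key x == v')) := by
      rw [List.flatMap_def, List.flatMap_def]
      refine congrArg List.flatten (List.map_congr_left ?_)
      intro v' hv'
      rw [List.filter_filter]
      refine (List.filter_congr ?_).symm
      intro x _
      by_cases hx : key x = v'
      · have hxv : ¬ v' = v := fun h => hvnotin (h ▸ hv')
        simp [hx, hxv]
      · simp [hx]
    rw [hrest]
    refine List.Perm.trans (List.Perm.append_left _ (ih (List.nodup_cons.1 hnd).2 _ ?_))
      (List.filter_append_perm _ l)
    intro x hx
    have hx1 := List.mem_of_mem_filter hx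
    have hx2 := List.of_mem_filter hx
    have := hl x hx1
    rcases List.mem_cons.1 this with h | h
    · rw [h] at hx2; simp at hx2
    · exact h

-- ===== outer induction over the descending value list =====

def pvGood (vs : List Int) (ra : List (Int × Option Int × Int)) (rb : List Int) : Prop :=
  ra.length = rb.length ∧ ∀ k : Nat, (ra.getD k pvD).1 = rb.getD k 0 ∧
    ∀ u, (ra.getD k pvD).2.1 = some u → ∀ v' ∈ vs, v' < u

lemma pvOuter (cells : List (Int × Int × Int)) (hmem : ∀ t ∈ cells, 0 ≤ t.2.1 ∧ 0 ≤ t.2.2) :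
    ∀ (vs : List Int), vs.Pairwise (fun a b => b < a) →
    ∀ ra ca rb cb (res : Int), pvGood vs ra rb → pvGood vs ca cb →
    ((vs.flatMap (fun v => (cells.filter (fun t => t.1 == v)).reverse)).foldl pvStepA (ra, ca, res)).2.2 =
    (vs.foldl (fun st v =>
        ((cells.filter (fun t => t.1 == v)).map (fun t =>
          (t.2.1, t.2.2, max (PySem.List.pyGetD st.1 t.2.1 0) (PySem.List.pyGetD st.2.1 t.2.2 0) + 1))).foldl
          pvStepB st) (rb, cb, res)).2.2 := by
  intro vs
  induction vs with
  | nil => intro _ ra ca rb cb res _ _; rfl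
  | cons v vs ih =>
    intro hpw ra ca rb cb res hgr hgc
    have hpwt := List.pairwise_cons.1 hpw
    rw [List.flatMap_cons, List.foldl_append]
    simp only [List.foldl_cons]
    have hsr : pvStart v ra rb := ⟨hgr.1, fun k => ⟨(hgr.2 k).1, fun hsv => by
      have := (hgr.2 k).2 v hsv v (List.mem_cons_self ..); omega⟩⟩
    have hsc : pvStart v ca cb := ⟨hgc.1, fun k => ⟨(hgc.2 k).1, fun hsv => by
      have := (hgc.2 k).2 v hsv v (List.mem_cons_self ..); omega⟩⟩
    have hmr0 : pvMid v ra rb ra rb := ⟨hsr.1, rfl, fun k => ⟨(hgr.2 k).1, Or.inl ⟨rfl, rfl⟩⟩⟩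
    have hmc0 : pvMid v ca cb ca cb := ⟨hsc.1, rfl, fun k => ⟨(hgc.2 k).1, Or.inl ⟨rfl, rfl⟩⟩⟩
    have hglmem : ∀ t ∈ (cells.filter (fun t => t.1 == v)).reverse,
        t.1 = v ∧ 0 ≤ t.2.1 ∧ 0 ≤ t.2.2 := by
      intro t htmem
      rw [List.mem_reverse] at htmem
      have h1 := List.of_mem_filter htmem
      have h2 := hmem t (List.mem_of_mem_filter htmem)
      exact ⟨by simpa using h1, h2⟩
    have hg1 := pvG1 v ra ca rb cb hsr hsc _ hglmem ra ca rb cb res hmr0 hmc0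
    have hBperm : (((cells.filter (fun t => t.1 == v)).reverse).map (fun t =>
          (t.2.1, t.2.2, max (PySem.List.pyGetD rb t.2.1 0) (PySem.List.pyGetD cb t.2.2 0) + 1))).foldl
          pvStepB (rb, cb, res) =
        ((cells.filter (fun t => t.1 == v)).map (fun t =>
          (t.2.1, t.2.2, max (PySem.List.pyGetD rb t.2.1 0) (PySem.List.pyGetD cb t.2.2 0) + 1))).foldl
          pvStepB (rb, cb, res) := by
      apply pvB_perm
      · rw [List.map_reverse]
        exact List.reverse_perm _
      · intro c hc
        rw [List.mem_map] at hc
        obtain ⟨t, htm, rfl⟩ := hc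
        rw [List.mem_reverse] at htm
        have := hmem t (List.mem_of_mem_filter htm)
        exact ⟨this.1, this.2⟩
    rw [hBperm] at hg1
    rcases hA : ((cells.filter (fun t => t.1 == v)).reverse).foldl pvStepA (ra, ca, res) with ⟨ra1, ca1, res1⟩
    rcases hB : ((cells.filter (fun t => t.1 == v)).map (fun t =>
          (t.2.1, t.2.2, max (PySem.List.pyGetD rb t.2.1 0) (PySem.List.pyGetD cb t.2.2 0) + 1))).foldl
          pvStepB (rb, cb, res) with ⟨rb1, cb1, res1'⟩
    rw [hA, hB] at hg1
    have hres : res1 = res1' := hg1.2.2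
    subst hres
    have hnew : ∀ (x0 : List (Int × Option Int × Int)) (y0 : List Int)
        (x1 : List (Int × Option Int × Int)) (y1 : List Int),
        pvGood (v :: vs) x0 y0 → pvMid v x0 y0 x1 y1 → pvGood vs x1 y1 := by
      intro x0 y0 x1 y1 hg hm
      obtain ⟨hl1, hl2, hp⟩ := hm
      refine ⟨by rw [hl1, hl2], fun k => ⟨(hp k).1, ?_⟩⟩
      intro u hu v' hv'
      rcases (hp k).2 with ⟨heq, _⟩ | ⟨hsv, _⟩
      · exact (hg.2 k).2 u (heq ▸ hu) v' (List.mem_cons_of_mem _ hv')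
      · rw [hsv] at hu
        have : u = v := (Option.some.inj hu).symm
        subst this
        exact hpwt.1 v' hv'
    rw [hA, hB]
    exact ih hpwt.2 ra1 ca1 rb1 cb1 res1 (hnew ra rb ra1 rb1 hgr hg1.1) (hnew ca cb ca1 cb1 hgc hg1.2.1)

-- ===== assembling the two ports =====

lemma pvMain (mat : List (List Int)) :
    maxIncreasingCells mat = maxIncreasingCells_alt mat := by
  unfold maxIncreasingCells maxIncreasingCells_alt
  dsimp only
  set M : Int := PySem.List.len mat with hM
  set N : Int := PySem.List.len (PySem.List.pyGetD mat 0 []) with hN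
  set g : Int → Int → Int := fun i j => PySem.List.pyGetD (PySem.List.pyGetD mat i []) j 0 with hg
  set cells : List (Int × Int × Int) := (PySem.List.pyRange 0 M 1).flatMap (fun i =>
      (PySem.List.pyRange 0 N 1).map (fun j => (g i j, i, j))) with hcells
  have hpw := pvCells_pw g M N
  have hmem := pvCells_mem g M N
  rw [← hcells] at hpw hmem
  -- the distinct values, descending
  set vals : List Int :=
    PySem.List.sorted (PySem.Set.ofList (cells.map (fun t => t.1))) (fun x => x) true with hvals
  have hvperm : vals.Perm (PySem.Set.ofList (cells.map (fun t => t.1))) :=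
    PySem.List.sorted_perm _ _ true
  have hvnodup : vals.Nodup := hvperm.symm.nodup (PySem.Set.nodup_ofList _)
  have hvpw : vals.Pairwise (fun a b => b < a) := by
    have h1 : vals.Pairwise (fun a b : Int => b ≤ a) :=
      PySem.List.sorted_pairwise_rev _ (fun x => x)
    exact (h1.and hvnodup).imp (fun {a b} h => by
      rcases h with ⟨h1, h2⟩; omega)
  have hvmem : ∀ t ∈ cells, t.1 ∈ vals := fun t ht =>
    (PySem.List.mem_sorted _ _ _ _).2 ((PySem.Set.mem_ofList _ _).2 (List.mem_map_of_mem ht))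
  -- A's sorted cell list is the concatenation of the reversed row-major value groups
  have hys : PySem.List.sorted2 cells (fun t => t.1) (fun t => t.2.1 * N + t.2.2) true =
      vals.flatMap (fun v => (cells.filter (fun t => t.1 == v)).reverse) := by
    apply pvSorted2_rev_eq
    · exact hpw.imp (fun {a b} h => by omega)
    · exact (List.Perm.flatMap_left vals (fun v _ => List.reverse_perm _)).trans
        (pvPerm_flatMap_filter (fun t => t.1) vals hvnodup cells hvmem)
    · rw [List.pairwise_flatMap]
      constructor
      · intro v _
        rw [List.pairwise_reverse]
        refine (hpw.filter _).imp_of_mem ?_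
        intro a b ha hb hR
        have ha1 : a.1 = v := by simpa using List.of_mem_filter ha
        have hb1 : b.1 = v := by simpa using List.of_mem_filter hb
        exact Or.inr ⟨ha1.trans hb1.symm, hR⟩
      · refine hvpw.imp_of_mem ?_
        intro v1 v2 _ _ hlt x hx y hy
        rw [List.mem_reverse] at hx hy
        have hx1 : x.1 = v1 := by simpa using List.of_mem_filter hx
        have hy1 : y.1 = v2 := by simpa using List.of_mem_filter hy
        exact Or.inl (by omega)
  rw [hys]
  -- B's dict of value groups, built over the same cell list
  have hgroups : cells.foldl (fun d t => d.modify t.1 [] (fun l => l ++ [t.2])) PySem.Dict.empty =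
      (PySem.List.pyRange 0 M 1).foldl (fun d i =>
        (PySem.List.pyRange 0 N 1).foldl (fun d j =>
          d.modify (g i j) [] (fun l => l ++ [(i, j)])) d) PySem.Dict.empty := by
    rw [hcells, List.foldl_flatMap]
    simp only [List.foldl_map]
  rw [← hgroups]
  have hkeys : (cells.foldl (fun d t => d.modify t.1 [] (fun l => l ++ [t.2]))
      PySem.Dict.empty).keys = PySem.Set.ofList (cells.map (fun t => t.1)) := by
    have h := PySem.Dict.keys_foldl_modify_key cells (fun t => t.1) []
      (fun _ t => fun l => l ++ [t.2]) PySem.Dict.empty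
    simpa [PySem.Dict.keys_empty, PySem.Set.update_nil_left] using h
  rw [hkeys, ← hvals]
  have hgetD : ∀ v : Int, (cells.foldl (fun d t => d.modify t.1 [] (fun l => l ++ [t.2]))
      PySem.Dict.empty).getD v [] = (cells.filter (fun t => t.1 == v)).map (fun t => t.2) := by
    intro v
    simpa using PySem.Dict.getD_foldl_modify_append cells PySem.Dict.empty v
  simp only [hgetD, List.map_map]
  -- initial states
  have hlen0 : ((PySem.List.pyRange 0 M 1).map
      (fun _ => ((0:Int), (none : Option Int), (0:Int)))).length = M.toNat := by
    rw [List.length_map, PySem.List.length_pyRange_one]; omega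
  have hlenN : ((PySem.List.pyRange 0 N 1).map
      (fun _ => ((0:Int), (none : Option Int), (0:Int)))).length = N.toNat := by
    rw [List.length_map, PySem.List.length_pyRange_one]; omega
  have hA0 : ∀ (b : Int) (k : Nat), (((PySem.List.pyRange 0 b 1).map
      (fun _ => ((0:Int), (none : Option Int), (0:Int)))).getD k pvD) = pvD := by
    intro b k
    rw [List.getD_eq_getElem?_getD, List.getElem?_map]
    cases h : (PySem.List.pyRange 0 b 1)[k]? <;> simp [pvD]
  have hB0 : ∀ (n : Nat) (k : Nat), ((List.replicate n (0:Int)).getD k 0) = 0 := by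
    intro n k
    rw [List.getD_eq_getElem?_getD, List.getElem?_replicate]
    split <;> rfl
  have hgoodr : pvGood vals ((PySem.List.pyRange 0 M 1).map
      (fun _ => ((0:Int), (none : Option Int), (0:Int)))) (List.replicate M.toNat 0) := by
    refine ⟨by rw [hlen0, List.length_replicate], fun k => ?_⟩
    rw [hA0, hB0]
    exact ⟨rfl, fun u hu => absurd hu (by simp [pvD])⟩
  have hgoodc : pvGood vals ((PySem.List.pyRange 0 N 1).map
      (fun _ => ((0:Int), (none : Option Int), (0:Int)))) (List.replicate N.toNat 0) := by
    refine ⟨by rw [hlenN, List.length_replicate], fun k => ?_⟩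
    rw [hA0, hB0]
    exact ⟨rfl, fun u hu => absurd hu (by simp [pvD])⟩
  have houter := pvOuter cells hmem vals hvpw
    ((PySem.List.pyRange 0 M 1).map (fun _ => ((0:Int), (none : Option Int), (0:Int))))
    ((PySem.List.pyRange 0 N 1).map (fun _ => ((0:Int), (none : Option Int), (0:Int))))
    (List.replicate M.toNat 0) (List.replicate N.toNat 0) 0 hgoodr hgoodc
  exact houter

-- ===== VERDICT (by name: the statement is the Claim_ definition above) =====
theorem maxIncreasingCells_spec : Claim_equal_maxIncreasingCells := by
  intro mat _ _
  unfold Spec_maxIncreasingCells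
  exact pvMain mat
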